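-- pv_equiv track=rewrite | github.com/curieshicy/My_Utilities_Code | Grokking_the_Coding_Interviews/p58_minimum_difference_element.py | search_min_diff_element_educative
-- ===== SOURCE A (Python) =====
-- def search_min_diff_element_educative(arr, key):
--     if key >= arr[-1]:
--         return arr[-1]
--
--     if key <= arr[0]:
--         return arr[0]
--
--     # find the ceiling of the key
--     # the smallest number in the array that is greater or equal than key
--     l = 0
--     h = len(arr) - 1
--     while l <= h:
--         m = (l + h) // 2
--         if arr[m] == key:
--             return key
--
--         elif arr[m] < key:
--             l = m + 1
--         else:
--             h = m - 1
--
--     if abs(arr[l] - key) > abs(arr[h] - key):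
--         return arr[h]
--     else:
--         return arr[l]
-- ===== SOURCE B (Python) =====
-- def search_min_diff_element_educative(arr, key):
--     last = arr[-1]
--     if key >= last:
--         return last
--     first = arr[0]
--     if key <= first:
--         return first
--
--     def go(l, w):
--         # l = left edge of the active window, w = its width; the window is arr[l : l + w]
--         if w <= 0:
--             lo, hi = arr[l - 1], arr[l]
--             return lo if abs(hi - key) > abs(lo - key) else hi
--         half = (w - 1) // 2
--         m = l + half
--         am = arr[m]
--         if am == key:
--             return key
--         if am < key:
--             return go(m + 1, w - 1 - half)
--         return go(l, half)
--
--     return go(0, len(arr))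
-- ===== Notes on version B (the rewrite author's own statement) =====
-- stated objective: alternative
-- what changed: A's iterative two-pointer (l,h) while loop with a post-loop l/h tie-break is replaced by a recursive descent that carries only the left edge and the WIDTH of the active window (half = (w-1)//2) and performs the tie-break in the empty-window base case, so the high pointer disappears entirely.
import Mathlib
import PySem

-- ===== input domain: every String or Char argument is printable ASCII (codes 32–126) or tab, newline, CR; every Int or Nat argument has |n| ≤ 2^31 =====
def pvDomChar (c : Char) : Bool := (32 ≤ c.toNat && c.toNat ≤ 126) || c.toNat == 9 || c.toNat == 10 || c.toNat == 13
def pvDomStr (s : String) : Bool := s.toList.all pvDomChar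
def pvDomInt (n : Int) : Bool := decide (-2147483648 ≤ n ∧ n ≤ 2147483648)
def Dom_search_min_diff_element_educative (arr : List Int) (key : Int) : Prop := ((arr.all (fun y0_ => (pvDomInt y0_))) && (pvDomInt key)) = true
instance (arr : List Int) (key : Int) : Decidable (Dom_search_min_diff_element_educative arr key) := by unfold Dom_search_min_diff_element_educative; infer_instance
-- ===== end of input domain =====

-- B replaces A's two-pointer (l,h) while loop by a recursive descent over a single
-- left edge plus the WIDTH of the active window, with the tie-break in the empty-window
-- base case (alternative decomposition; same asymptotic cost).

-- ===== PORT A =====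
-- A's while loop: state (l, h); element access via pyGet? (default only reached outside Pre_)
def search_min_diff_while (arr : List Int) (key : Int) (l h : Int) : Int :=
  if l ≤ h then
    let m := PySem.Int.floordiv (l + h) 2
    let am := (PySem.List.pyGet? arr m).getD 0
    if am = key then key
    else if am < key then search_min_diff_while arr key (m + 1) h
    else search_min_diff_while arr key l (m - 1)
  else
    let al := (PySem.List.pyGet? arr l).getD 0
    let ah := (PySem.List.pyGet? arr h).getD 0
    if |al - key| > |ah - key| then ah else al
termination_by (h + 1 - l).toNat
decreasing_by
  · have := PySem.Int.floordiv_two_mid_bounds (by assumption : l ≤ h)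
    omega
  · have := PySem.Int.floordiv_two_mid_bounds (by assumption : l ≤ h)
    omega

def search_min_diff_element_educative (arr : List Int) (key : Int) : Int :=
  if (PySem.List.pyGet? arr (-1)).getD 0 ≤ key then (PySem.List.pyGet? arr (-1)).getD 0
  else if key ≤ (PySem.List.pyGet? arr 0).getD 0 then (PySem.List.pyGet? arr 0).getD 0
  else search_min_diff_while arr key 0 (arr.length - 1)

-- ===== PORT B =====
-- Source B's inner go: left edge l and window width w; base case w ≤ 0 does the tie-break
def search_min_diff_go (arr : List Int) (key : Int) (l w : Int) : Int :=
  if w ≤ 0 then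
    let lo := (PySem.List.pyGet? arr (l - 1)).getD 0
    let hi := (PySem.List.pyGet? arr l).getD 0
    if |hi - key| > |lo - key| then lo else hi
  else
    let half := PySem.Int.floordiv (w - 1) 2
    let am := (PySem.List.pyGet? arr (l + half)).getD 0
    if am = key then key
    else if am < key then search_min_diff_go arr key (l + half + 1) (w - 1 - half)
    else search_min_diff_go arr key l half
termination_by w.toNat
decreasing_by
  · have h := PySem.Int.floordiv_two_mid_bounds (by omega : (0:Int) ≤ w - 1)
    rw [zero_add] at h
    omega
  · have h := PySem.Int.floordiv_two_mid_bounds (by omega : (0:Int) ≤ w - 1)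
    rw [zero_add] at h
    omega

def search_min_diff_element_educative_alt (arr : List Int) (key : Int) : Int :=
  let last := (PySem.List.pyGet? arr (-1)).getD 0
  if last ≤ key then last
  else
    let first := (PySem.List.pyGet? arr 0).getD 0
    if key ≤ first then first
    else search_min_diff_go arr key 0 arr.length

-- ===== PRECONDITION & SPEC =====
-- Pre_: Python A raises IndexError (arr[-1]) on the empty list; everything else is admitted.
def Pre_search_min_diff_element_educative (arr : List Int) (key : Int) : Prop := arr ≠ []
instance (arr : List Int) (key : Int) : Decidable (Pre_search_min_diff_element_educative arr key) := by unfold Pre_search_min_diff_element_educative; infer_instance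
def pvWitness_search_min_diff_element_educative : List Int × Int := ([2, 5, 10], 7)

def Spec_search_min_diff_element_educative (arr : List Int) (key : Int) (out : Int) : Prop := out = search_min_diff_element_educative_alt arr key
instance (arr : List Int) (key : Int) (out : Int) : Decidable (Spec_search_min_diff_element_educative arr key out) := by unfold Spec_search_min_diff_element_educative; infer_instance

-- ===== CLAIM (what is proved, stated in full; the proofs are below) =====
def Claim_equal_search_min_diff_element_educative : Prop := ∀ (arr : List Int) (key : Int), Dom_search_min_diff_element_educative arr key → Pre_search_min_diff_element_educative arr key → Spec_search_min_diff_element_educative arr key (search_min_diff_element_educative arr key)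

-- ===== LEMMAS AND PROOFS =====

-- Python midpoint identity: (l+h)//2 = l + (h-l)//2
theorem floordiv_mid_shift (l h : Int) :
    PySem.Int.floordiv (l + h) 2 = l + PySem.Int.floordiv (h - l) 2 := by
  rw [PySem.Int.floordiv_eq_ediv_of_pos (by norm_num), PySem.Int.floordiv_eq_ediv_of_pos (by norm_num)]
  omega

-- core: A's loop from (l,h) equals B's go from (l, h+1-l), for nonnegative width
theorem while_eq_go (arr : List Int) (key : Int) :
    ∀ (n : Nat) (l h : Int), (h + 1 - l).toNat = n → 0 ≤ h + 1 - l →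
      search_min_diff_while arr key l h = search_min_diff_go arr key l (h + 1 - l) := by
  intro n
  induction n using Nat.strong_induction_on with
  | _ n ih =>
    intro l h hn hw0
    rw [search_min_diff_while, search_min_diff_go]
    by_cases hle : l ≤ h
    · rw [if_pos hle, if_neg (by omega : ¬ h + 1 - l ≤ 0)]
      simp only
      have hsub : h + 1 - l - 1 = h - l := by ring
      rw [hsub]
      have hmid : PySem.Int.floordiv (l + h) 2 = l + PySem.Int.floordiv (h - l) 2 :=
        floordiv_mid_shift l h
      have hb := PySem.Int.floordiv_two_mid_bounds hle
      rw [← hmid]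
      by_cases h1 : (PySem.List.pyGet? arr (PySem.Int.floordiv (l + h) 2)).getD 0 = key
      · rw [if_pos h1, if_pos h1]
      · rw [if_neg h1, if_neg h1]
        by_cases h2 : (PySem.List.pyGet? arr (PySem.Int.floordiv (l + h) 2)).getD 0 < key
        · rw [if_pos h2, if_pos h2]
          have e1 : h - l - PySem.Int.floordiv (h - l) 2
              = h + 1 - (PySem.Int.floordiv (l + h) 2 + 1) := by omega
          rw [e1]
          exact ih _ (by omega) _ _ rfl (by omega)
        · rw [if_neg h2, if_neg h2]
          have e2 : PySem.Int.floordiv (h - l) 2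
              = PySem.Int.floordiv (l + h) 2 - 1 + 1 - l := by omega
          rw [e2]
          exact ih _ (by omega) _ _ rfl (by omega)
    · rw [if_neg hle, if_pos (by omega : h + 1 - l ≤ 0)]
      have hh : h = l - 1 := by omega
      subst hh
      rfl

-- ===== VERDICT (by name: the statement is the Claim_ definition above) =====
theorem search_min_diff_element_educative_spec : Claim_equal_search_min_diff_element_educative := by
  intro arr key _ _
  unfold Spec_search_min_diff_element_educative
  unfold search_min_diff_element_educative search_min_diff_element_educative_alt
  simp only []
  split_ifs
  · rfl
  · rfl
  · have h := while_eq_go arr key _ 0 ((arr.length : Int) - 1) rfl (by omega)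
    rw [show ((arr.length : Int) - 1 + 1 - 0) = (arr.length : Int) from by ring] at h
    exact h
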